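-- pv_equiv track=rewrite | github.com/MrBrantCode/unitest_baseline | mut_generate/mist_train_taco/taco_16335/solution.py | min_adjustment_cost
-- ===== SOURCE A (Python) =====
-- def min_adjustment_cost(arr, target):
--     n = len(arr)
--     M = max(arr)
--     dp = [[0 for _ in range(M + 1)] for _ in range(n)]
--
--     # Initialize the first row of dp array
--     for j in range(M + 1):
--         dp[0][j] = abs(j - arr[0])
--
--     # Fill the dp array
--     for i in range(1, n):
--         for j in range(M + 1):
--             dp[i][j] = float('inf')
--             for k in range(max(j - target, 0), min(M, j + target) + 1):
--                 dp[i][j] = min(dp[i][j], dp[i - 1][k] + abs(arr[i] - j))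
--
--     # Find the minimum adjustment cost
--     res = float('inf')
--     for j in range(M + 1):
--         res = min(res, dp[n - 1][j])
--
--     return res
-- ===== SOURCE B (Python) =====
-- def min_adjustment_cost(arr, target):
--     M = max(arr)
--     row = [abs(j - arr[0]) for j in range(M + 1)]
--     s = min(target, M)
--     for a in arr[1:]:
--         for _ in range(s):
--             row = [min(row[max(j - 1, 0)], row[j], row[min(j + 1, M)])
--                    for j in range(M + 1)]
--         row = [row[j] + abs(a - j) for j in range(M + 1)]
--     return min(row)
-- ===== Notes on version B (the rewrite author's own statement) =====
-- stated objective: alternative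
-- what changed: Replaces A's full n x (M+1) DP table with per-cell window scans by a single rolling row transformed, for each element, by min(target,M) radius-1 min-smoothing passes (erosion decomposition of the windowed minimum).
-- outside the precondition, e.g. on min_adjustment_cost([-1], 2): A returns inf, B raises ValueError; on min_adjustment_cost([1, 2], -1): A returns inf, B returns 1
import Mathlib
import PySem

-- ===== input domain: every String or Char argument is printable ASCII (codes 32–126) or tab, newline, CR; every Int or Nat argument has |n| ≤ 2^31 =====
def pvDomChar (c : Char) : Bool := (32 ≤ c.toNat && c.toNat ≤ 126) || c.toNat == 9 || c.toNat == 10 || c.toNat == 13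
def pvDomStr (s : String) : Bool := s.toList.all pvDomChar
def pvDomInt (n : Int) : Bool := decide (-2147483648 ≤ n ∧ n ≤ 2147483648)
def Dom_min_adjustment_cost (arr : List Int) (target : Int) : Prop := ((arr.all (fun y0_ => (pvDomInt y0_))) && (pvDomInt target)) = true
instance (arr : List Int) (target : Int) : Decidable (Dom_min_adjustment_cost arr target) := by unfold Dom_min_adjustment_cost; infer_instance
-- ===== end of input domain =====

-- B replaces A's full DP table and per-cell window scans by one rolling row smoothed with
-- min(target,M) radius-1 min passes per element (erosion decomposition); alternative structure, same cost.


-- ===== PORT A =====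
-- Python's float('inf') cells are modelled as `none` (Option Int); `pmin2` is Python's
-- `min` on such cells (min(inf, x) = x).
def pmin2 (a b : Option Int) : Option Int :=
  match a, b with
  | none, b => b
  | some x, none => some x
  | some x, some y => some (min x y)

-- body of A's loop over i in range(1, n): appends row i computed from row i-1
def stepA (arr : List Int) (target M : Int) (dp : List (List (Option Int))) (i : Int) :
    List (List (Option Int)) :=
  let ai := PySem.List.pyGetD arr i 0
  let prev := PySem.List.pyGetD dp (i - 1) []
  dp ++ [(PySem.List.pyRange 0 (M + 1) 1).map (fun j =>
    (PySem.List.pyRange (max (j - target) 0) (min M (j + target) + 1) 1).foldl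
      (fun acc k => pmin2 acc ((PySem.List.pyGetD prev k none).map (fun v => v + |ai - j|)))
      none)]

def min_adjustment_cost (arr : List Int) (target : Int) : Int :=
  let n : Int := arr.length
  let M : Int := (PySem.List.max? arr (fun y => y)).getD 0
  let row0 : List (Option Int) :=
    (PySem.List.pyRange 0 (M + 1) 1).map (fun j => some |j - PySem.List.pyGetD arr 0 0|)
  let dp := (PySem.List.pyRange 1 n 1).foldl (stepA arr target M) [row0]
  let res := (PySem.List.pyRange 0 (M + 1) 1).foldl
    (fun res j => pmin2 res (PySem.List.pyGetD (PySem.List.pyGetD dp (n - 1) []) j none)) none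
  res.getD 0

-- ===== PORT B =====
-- one radius-1 min-smoothing pass over a row of length M+1 (Source B's inner comprehension)
def erode (M : Int) (r : List Int) : List Int :=
  (PySem.List.pyRange 0 (M + 1) 1).map (fun j =>
    min (min (PySem.List.pyGetD r (max (j - 1) 0) 0) (PySem.List.pyGetD r j 0))
        (PySem.List.pyGetD r (min (j + 1) M) 0))

-- body of Source B's loop over `for a in arr[1:]`
def stepB (M target : Int) (row : List Int) (a : Int) : List Int :=
  let er := (PySem.List.pyRange 0 (min target M) 1).foldl (fun q _ => erode M q) row
  (PySem.List.pyRange 0 (M + 1) 1).map (fun j => PySem.List.pyGetD er j 0 + |a - j|)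

def min_adjustment_cost_alt (arr : List Int) (target : Int) : Int :=
  let M : Int := (PySem.List.max? arr (fun y => y)).getD 0
  let row0 : List Int :=
    (PySem.List.pyRange 0 (M + 1) 1).map (fun j => |j - PySem.List.pyGetD arr 0 0|)
  let fin := (arr.drop 1).foldl (stepB M target) row0
  (PySem.List.min? fin (fun y => y)).getD 0

-- ===== PRECONDITION & SPEC =====
-- Pre_ excludes exactly the inputs on which A returns float('inf') — not an int: the empty
-- list (max() raises there), lists whose maximum is negative, and negative targets with
-- at least two elements.
def Pre_min_adjustment_cost (arr : List Int) (target : Int) : Prop :=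
  arr ≠ [] ∧ (∃ x ∈ arr, 0 ≤ x) ∧ (arr.length = 1 ∨ 0 ≤ target)
instance (arr : List Int) (target : Int) : Decidable (Pre_min_adjustment_cost arr target) := by
  unfold Pre_min_adjustment_cost; infer_instance

def pvWitness_min_adjustment_cost : List Int × Int := ([1, 3, 0, 2], 1)

def Spec_min_adjustment_cost (arr : List Int) (target : Int) (out : Int) : Prop :=
  out = min_adjustment_cost_alt arr target
instance (arr : List Int) (target : Int) (out : Int) :
    Decidable (Spec_min_adjustment_cost arr target out) := by
  unfold Spec_min_adjustment_cost; infer_instance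

-- ===== CLAIM (what is proved, stated in full; the proofs are below) =====
def Claim_equal_min_adjustment_cost : Prop :=
  ∀ (arr : List Int) (target : Int), Dom_min_adjustment_cost arr target →
    Pre_min_adjustment_cost arr target →
    Spec_min_adjustment_cost arr target (min_adjustment_cost arr target)

-- ===== LEMMAS AND PROOFS =====

-- Option Int viewed as WithTop Int (none = +infinity)
def toW (o : Option Int) : WithTop Int :=
  match o with
  | none => ⊤
  | some x => (x : WithTop Int)

theorem toW_some (x : Int) : toW (some x) = (x : WithTop Int) := rfl
theorem toW_none : toW none = (⊤ : WithTop Int) := rfl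

theorem toW_inj (a b : Option Int) (h : toW a = toW b) : a = b := by
  cases a <;> cases b <;> simp_all [toW]

theorem toW_pmin2 (a b : Option Int) : toW (pmin2 a b) = min (toW a) (toW b) := by
  cases a <;> cases b <;> simp [toW, pmin2]

-- minimum of f over the index interval [l, r)
noncomputable def W (f : List Int) (l r : Int) : WithTop Int :=
  ((PySem.List.pyRange l r 1).map (fun k => PySem.List.pyGetD f k 0)).minimum

theorem W_append (f : List Int) (l m r : Int) (h1 : l ≤ m) (h2 : m ≤ r) :
    W f l r = min (W f l m) (W f m r) := by
  unfold W
  rw [PySem.List.pyRange_one_append l m r h1 h2, List.map_append, List.minimum_append]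

theorem W_anti (f : List Int) (l1 r1 l2 r2 : Int) (h1 : l1 ≤ l2) (h2 : r2 ≤ r1) :
    W f l1 r1 ≤ W f l2 r2 := by
  apply List.minimum_anti
  intro x hx
  simp only [List.mem_map] at hx ⊢
  obtain ⟨k, hk, rfl⟩ := hx
  exact ⟨k, by rw [PySem.List.mem_pyRange_one] at hk ⊢; omega, rfl⟩

theorem W_union (f : List Int) (l1 r1 l2 r2 : Int)
    (h1 : l1 ≤ l2) (h2 : l2 ≤ r1) (h3 : r1 ≤ r2) :
    min (W f l1 r1) (W f l2 r2) = W f l1 r2 := by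
  rw [W_append f l2 r1 r2 h2 h3, ← min_assoc,
    min_eq_left (W_anti f l1 r1 l2 r1 h1 le_rfl), ← W_append f l1 r1 r2 (le_trans h1 h2) h3]

theorem W_singleton (f : List Int) (j : Int) :
    W f j (j + 1) = ((PySem.List.pyGetD f j 0 : Int) : WithTop Int) := by
  unfold W
  rw [PySem.List.pyRange_one_singleton]
  simp [List.minimum_singleton]

-- s-fold erosion
def erodeIter (M : Int) : Nat → List Int → List Int
  | 0, f => f
  | s + 1, f => erode M (erodeIter M s f)

theorem erodeIter_swap (M : Int) (s : Nat) (f : List Int) :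
    erodeIter M (s + 1) f = erodeIter M s (erode M f) := by
  induction s generalizing f with
  | zero => rfl
  | succ s ih => show erode M (erodeIter M (s+1) f) = _; rw [ih]; rfl

theorem foldl_erode (M : Int) (L : List Int) (f : List Int) :
    L.foldl (fun q _ => erode M q) f = erodeIter M L.length f := by
  induction L generalizing f with
  | nil => rfl
  | cons x t ih => simp only [List.foldl_cons, List.length_cons, ih, erodeIter_swap]

theorem erode_char (M : Int) (f : List Int) (s : Nat) :
    ∀ (j : Int), 0 ≤ j → j ≤ M →
      W f (max (j - s) 0) (min M (j + s) + 1) =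
        ((PySem.List.pyGetD (erodeIter M s f) j 0 : Int) : WithTop Int) := by
  induction s with
  | zero =>
    intro j hj0 hjM
    have h1 : max (j - ((0:Nat):Int)) 0 = j := by omega
    have h2 : min M (j + ((0:Nat):Int)) + 1 = j + 1 := by omega
    rw [h1, h2, W_singleton]
    rfl
  | succ s ih =>
    intro j hj0 hjM
    have hget : PySem.List.pyGetD (erodeIter M (s+1) f) j 0 =
        min (min (PySem.List.pyGetD (erodeIter M s f) (max (j - 1) 0) 0)
                 (PySem.List.pyGetD (erodeIter M s f) j 0))
            (PySem.List.pyGetD (erodeIter M s f) (min (j + 1) M) 0) := by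
      show PySem.List.pyGetD (erode M (erodeIter M s f)) j 0 = _
      unfold erode
      rw [PySem.List.pyGetD_map_pyRange_of_nonneg _ _ _ _ hj0 (by omega)]
    rw [hget]
    push_cast [WithTop.coe_min]
    rw [← ih (max (j - 1) 0) (by omega) (by omega), ← ih j hj0 hjM,
        ← ih (min (j + 1) M) (by omega) (by omega)]
    have hs : (0:Int) ≤ (s:Int) := by positivity
    rw [W_union f (max (max (j-1) 0 - (s:Int)) 0) (min M (max (j-1) 0 + (s:Int)) + 1)
          (max (j - (s:Int)) 0) (min M (j + (s:Int)) + 1)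
          (by omega) (by omega) (by omega)]
    rw [W_union f (max (max (j-1) 0 - (s:Int)) 0) (min M (j + (s:Int)) + 1)
          (max (min (j+1) M - (s:Int)) 0) (min M (min (j+1) M + (s:Int)) + 1)
          (by omega) (by omega) (by omega)]
    have e1 : max (j - ((s:Int) + 1)) 0 = max (max (j-1) 0 - (s:Int)) 0 := by omega
    have e2 : min M (j + ((s:Int) + 1)) + 1 = min M (min (j+1) M + (s:Int)) + 1 := by omega
    rw [e1, e2]

-- folding pmin2 over `some` values is List.minimum
theorem foldA (L : List Int) (g : Int → Int) (a : Option Int) :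
    toW (L.foldl (fun acc k => pmin2 acc (some (g k))) a) = min (toW a) (L.map g).minimum := by
  induction L generalizing a with
  | nil => simp [List.minimum_nil]
  | cons x t ih =>
    simp only [List.foldl_cons, List.map_cons, List.minimum_cons, ih, toW_pmin2, toW_some,
      min_assoc]

-- pulling a constant `+ c` out of the pmin2 fold
theorem foldAdd (L : List Int) (g : Int → Int) (c : Int) (a : Option Int) :
    L.foldl (fun acc k => pmin2 acc (some (g k + c))) (a.map (fun v => v + c)) =
      (L.foldl (fun acc k => pmin2 acc (some (g k))) a).map (fun v => v + c) := by
  induction L generalizing a with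
  | nil => rfl
  | cons x t ih =>
    simp only [List.foldl_cons]
    rw [← ih (pmin2 a (some (g x)))]
    congr 1
    cases a <;> simp [pmin2, min_add_add_right]

theorem foldl_min_swap (t : List Int) : ∀ x y : Int, t.foldl min (min x y) = min x (t.foldl min y) := by
  induction t with
  | nil => intro x y; rfl
  | cons z t ih => intro x y; rw [List.foldl_cons, List.foldl_cons, min_assoc, ih]

theorem minimum_cons_foldl (x : Int) (t : List Int) :
    (x :: t).minimum = ((t.foldl min x : Int) : WithTop Int) := by
  induction t generalizing x with
  | nil => simp
  | cons y t' ih =>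
    rw [List.minimum_cons, ih y, List.foldl_cons, foldl_min_swap, ← WithTop.coe_min]

-- the heart: A's window scan for one cell equals B's eroded row plus the cell cost
theorem step_char (M target : Int) (hM : 0 ≤ M) (ht : 0 ≤ target) (r : List Int)
    (hlen : r.length = (M + 1).toNat) (c : Int) (j : Int) (hj0 : 0 ≤ j) (hjM : j ≤ M) :
    (PySem.List.pyRange (max (j - target) 0) (min M (j + target) + 1) 1).foldl
      (fun acc k => pmin2 acc ((PySem.List.pyGetD (r.map some) k none).map (fun v => v + c)))
      none =
    some (PySem.List.pyGetD
      ((PySem.List.pyRange 0 (min target M) 1).foldl (fun q _ => erode M q) r) j 0 + c) := by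
  have hcong : (PySem.List.pyRange (max (j - target) 0) (min M (j + target) + 1) 1).foldl
      (fun acc k => pmin2 acc ((PySem.List.pyGetD (r.map some) k none).map (fun v => v + c)))
      none =
      (PySem.List.pyRange (max (j - target) 0) (min M (j + target) + 1) 1).foldl
      (fun acc k => pmin2 acc (some (PySem.List.pyGetD r k 0 + c))) none := by
    apply PySem.List.foldl_congr_mem
    intro acc k hk
    rw [PySem.List.mem_pyRange_one] at hk
    have hk0 : 0 ≤ k := by omega
    have hkl : k < (r.map some).length := by simp [hlen]; omega
    rw [PySem.List.pyGetD_eq_getElem _ _ hk0 hkl]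
    simp only [List.getElem_map]
    rw [PySem.List.pyGetD_eq_getElem _ _ hk0 (by simp at hkl ⊢; omega)]
    rfl
  rw [hcong]
  have hnone : (none : Option Int) = Option.map (fun v => v + c) none := rfl
  rw [hnone, foldAdd]
  have hcore : (PySem.List.pyRange (max (j - target) 0) (min M (j + target) + 1) 1).foldl
      (fun acc k => pmin2 acc (some (PySem.List.pyGetD r k 0))) none =
      some (PySem.List.pyGetD
        ((PySem.List.pyRange 0 (min target M) 1).foldl (fun q _ => erode M q) r) j 0) := by
    apply toW_inj
    rw [foldA, toW_none, toW_some]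
    have hmin : min (⊤ : WithTop Int)
        ((PySem.List.pyRange (max (j - target) 0) (min M (j + target) + 1) 1).map
          (fun k => PySem.List.pyGetD r k 0)).minimum =
        W r (max (j - target) 0) (min M (j + target) + 1) := by
      rw [min_eq_right le_top]; rfl
    rw [hmin]
    set s : Int := min target M with hs
    have hs0 : 0 ≤ s := by omega
    have hb1 : max (j - target) 0 = max (j - (s.toNat : Int)) 0 := by omega
    have hb2 : min M (j + target) + 1 = min M (j + (s.toNat : Int)) + 1 := by omega
    rw [hb1, hb2, erode_char M r s.toNat j hj0 hjM, foldl_erode,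
      PySem.List.length_pyRange_one]
    simp
  rw [hcore]
  rfl

-- one loop step: B's row stays the some-image of A's row
theorem step_row (arr : List Int) (M target : Int) (hM : 0 ≤ M) (ht : 0 ≤ target)
    (r : List Int) (hlen : r.length = (M + 1).toNat) (i : Int) :
    (PySem.List.pyRange 0 (M + 1) 1).map (fun j =>
      (PySem.List.pyRange (max (j - target) 0) (min M (j + target) + 1) 1).foldl
        (fun acc k => pmin2 acc ((PySem.List.pyGetD (r.map some) k none).map
          (fun v => v + |PySem.List.pyGetD arr i 0 - j|))) none) =
    (stepB M target r (PySem.List.pyGetD arr i 0)).map some := by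
  unfold stepB
  rw [List.map_map]
  apply List.map_congr_left
  intro j hj
  rw [PySem.List.mem_pyRange_one] at hj
  exact step_char M target hM ht r hlen _ j hj.1 (by omega)

-- the main loop invariant
theorem loop_eq (arr : List Int) (target M : Int) (hM : 0 ≤ M) :
    ∀ (cnt : Nat) (i : Int) (dp : List (List (Option Int))) (r : List Int),
      1 ≤ i → i + cnt = arr.length → dp.length = i.toNat →
      PySem.List.pyGetD dp (i - 1) [] = r.map some → r.length = (M + 1).toNat →
      (cnt = 0 ∨ 0 ≤ target) →
      PySem.List.pyGetD
          ((PySem.List.pyRange i arr.length 1).foldl (stepA arr target M) dp)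
          ((arr.length : Int) - 1) [] =
        ((arr.drop i.toNat).foldl (stepB M target) r).map some := by
  intro cnt
  induction cnt with
  | zero =>
    intro i dp r hi hcnt hdplen hlast hrlen _
    have hi' : i = (arr.length : Int) := by omega
    rw [hi', PySem.List.pyRange_one_eq_nil le_rfl]
    have : (arr.length : Int).toNat = arr.length := by omega
    rw [List.foldl_nil, this, List.drop_length, List.foldl_nil, ← hlast, hi']
  | succ cnt ih =>
    intro i dp r hi hcnt hdplen hlast hrlen hc
    have ht : 0 ≤ target := by
      cases hc with
      | inl h => omega
      | inr h => exact h
    have hin : i < (arr.length : Int) := by omega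
    rw [PySem.List.pyRange_one_cons hin, List.foldl_cons]
    have hdrop : arr.drop i.toNat = arr[i.toNat] :: arr.drop (i.toNat + 1) := by
      apply List.drop_eq_getElem_cons
    have hstepA : stepA arr target M dp i =
        dp ++ [(stepB M target r (PySem.List.pyGetD arr i 0)).map some] := by
      simp only [stepA]
      rw [hlast, step_row arr M target hM ht r hrlen i]
    rw [hstepA]
    have harri : arr[i.toNat]'(by omega) = PySem.List.pyGetD arr i 0 := by
      rw [PySem.List.pyGetD_eq_getElem _ _ (by omega) (by omega)]
    have := ih (i + 1) (dp ++ [(stepB M target r (PySem.List.pyGetD arr i 0)).map some])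
        (stepB M target r (PySem.List.pyGetD arr i 0))
        (by omega) (by omega)
        (by simp only [List.length_append, List.length_cons, List.length_nil, hdplen]; omega)
        (by
          have hix : i + 1 - 1 = (dp.length : Int) := by rw [hdplen]; omega
          rw [hix]
          have := PySem.List.pyGet?_append_length (pre := dp)
            (y := (stepB M target r (PySem.List.pyGetD arr i 0)).map some) (ys := ([] : List (List (Option Int))))
          simp only [PySem.List.pyGetD] at this ⊢
          rw [this]
          rfl)
        (by simp only [stepB]; simp [PySem.List.length_pyRange_one])
        (by omega)
    have hnt : (i + 1).toNat = i.toNat + 1 := by omega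
    rw [hnt] at this
    rw [this, hdrop, List.foldl_cons, harri]


theorem foldB_len (M target : Int) (L : List Int) (r : List Int)
    (h : r.length = (M + 1).toNat) :
    (L.foldl (stepB M target) r).length = (M + 1).toNat := by
  induction L generalizing r with
  | nil => exact h
  | cons a t ih =>
    rw [List.foldl_cons]
    exact ih _ (by unfold stepB; simp [PySem.List.length_pyRange_one])

-- final pass: A's running min over the last row equals Python's min(row)
theorem final_min (M : Int) (fin : List Int) (hlen : fin.length = (M + 1).toNat) (hM : 0 ≤ M) :
    ((PySem.List.pyRange 0 (M + 1) 1).foldl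
      (fun res j => pmin2 res (PySem.List.pyGetD (fin.map some) j none)) none).getD 0 =
    (PySem.List.min? fin (fun y => y)).getD 0 := by
  have hcong : (PySem.List.pyRange 0 (M + 1) 1).foldl
      (fun res j => pmin2 res (PySem.List.pyGetD (fin.map some) j none)) none =
      (PySem.List.pyRange 0 (M + 1) 1).foldl
      (fun res j => pmin2 res (some (PySem.List.pyGetD fin j 0))) none := by
    apply PySem.List.foldl_congr_mem
    intro acc j hj
    rw [PySem.List.mem_pyRange_one] at hj
    have hj0 : 0 ≤ j := hj.1
    have hjl : j < (fin.map some).length := by simp [hlen]; omega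
    rw [PySem.List.pyGetD_eq_getElem _ _ hj0 hjl]
    simp only [List.getElem_map]
    rw [PySem.List.pyGetD_eq_getElem _ _ hj0 (by simp at hjl ⊢; omega)]
  rw [hcong]
  obtain ⟨x, t, hxt⟩ : ∃ x t, fin = x :: t := by
    cases fin with
    | nil => exfalso; simp at hlen; omega
    | cons x t => exact ⟨x, t, rfl⟩
  have hA : (PySem.List.pyRange 0 (M + 1) 1).foldl
      (fun res j => pmin2 res (some (PySem.List.pyGetD fin j 0))) none =
      some (t.foldl min x) := by
    apply toW_inj
    rw [foldA _ _ _, toW_none, toW_some, min_eq_right le_top]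
    have hmap : (PySem.List.pyRange 0 (M + 1) 1).map (fun j => PySem.List.pyGetD fin j 0) = fin := by
      have h1 : (M + 1) = (fin.length : Int) := by omega
      rw [h1]
      exact PySem.List.map_pyGetD_pyRange_zero' fin 0
    rw [hmap, hxt, minimum_cons_foldl]
  rw [hA, hxt, PySem.List.min?_id_cons]

-- ===== VERDICT (by name: the statement is the Claim_ definition above) =====
theorem min_adjustment_cost_spec : Claim_equal_min_adjustment_cost := by
  intro arr target _ hpre
  obtain ⟨hne, hex, hlen1⟩ := hpre
  simp only [Spec_min_adjustment_cost, min_adjustment_cost, min_adjustment_cost_alt]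
  -- M and its nonnegativity
  set M : Int := (PySem.List.max? arr (fun y => y)).getD 0 with hMdef
  have hM : 0 ≤ M := by
    obtain ⟨x, hx, hx0⟩ := hex
    obtain ⟨m, hm⟩ : ∃ m, PySem.List.max? arr (fun y => y) = some m := by
      cases h : PySem.List.max? arr (fun y => y) with
      | none => exact absurd ((PySem.List.max?_eq_none_iff arr (fun y => y)).mp h) hne
      | some m => exact ⟨m, rfl⟩
    have := PySem.List.max?_isMax hm x hx
    rw [hMdef, hm]
    simp only [Option.getD_some]
    omega
  have hrow0 : (PySem.List.pyRange 0 (M + 1) 1).map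
      (fun j => some |j - PySem.List.pyGetD arr 0 0|) =
      ((PySem.List.pyRange 0 (M + 1) 1).map (fun j => |j - PySem.List.pyGetD arr 0 0|)).map some := by
    rw [List.map_map]
    rfl
  rw [hrow0]
  have hlen0 : ((PySem.List.pyRange 0 (M + 1) 1).map
      (fun j => |j - PySem.List.pyGetD arr 0 0|)).length = (M + 1).toNat := by
    simp [PySem.List.length_pyRange_one]
  have hlenarr : 1 ≤ arr.length := by
    cases arr with
    | nil => exact absurd rfl hne
    | cons _ _ => simp
  have hloop := loop_eq arr target M hM (arr.length - 1) 1 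
      [((PySem.List.pyRange 0 (M + 1) 1).map (fun j => |j - PySem.List.pyGetD arr 0 0|)).map some]
      ((PySem.List.pyRange 0 (M + 1) 1).map (fun j => |j - PySem.List.pyGetD arr 0 0|))
      le_rfl (by omega) (by simp)
      (by rw [show (1:Int) - 1 = 0 by ring, PySem.List.pyGetD_zero_cons])
      hlen0 (by rcases hlen1 with h | h
                · left; omega
                · right; exact h)
  rw [show ((1:Int).toNat) = 1 from rfl] at hloop
  rw [hloop]
  exact final_min M _ (foldB_len M target (arr.drop 1) _ hlen0) hM
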